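-- pv_equiv track=rewrite | github.com/AnthonyBaek/itscope-online-manual | programs/merge_initial_md_to_manual_md.py | extract_header_lines
-- ===== SOURCE A (Python) =====
-- def extract_header_lines(lines):
--     header_end = 0
--     h_count = 0
--     for i, line in enumerate(lines):
--         if line.strip().startswith('#'):
--             h_count += 1
--         if h_count >= 2:
--             header_end = i + 1
--             break
--     if header_end == 0:
--         # H2가 없으면 H1까지만
--         for i, line in enumerate(lines):
--             if line.strip().startswith('#'):
--                 header_end = i + 1
--                 break
--     return lines[:header_end], lines[header_end:]
-- ===== SOURCE B (Python) =====
-- def extract_header_lines(lines):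
--     positions = [i for i, line in enumerate(lines) if line.strip().startswith('#')]
--     header_end = positions[1] + 1 if len(positions) >= 2 else (positions[0] + 1 if positions else 0)
--     return lines[:header_end], lines[header_end:]
-- ===== Notes on version B (the rewrite author's own statement) =====
-- stated objective: simpler
-- what changed: Replaces A's two early-breaking counting scans and mutable counter with one comprehension building the full header-index table plus pure indexing into it.
import Mathlib
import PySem

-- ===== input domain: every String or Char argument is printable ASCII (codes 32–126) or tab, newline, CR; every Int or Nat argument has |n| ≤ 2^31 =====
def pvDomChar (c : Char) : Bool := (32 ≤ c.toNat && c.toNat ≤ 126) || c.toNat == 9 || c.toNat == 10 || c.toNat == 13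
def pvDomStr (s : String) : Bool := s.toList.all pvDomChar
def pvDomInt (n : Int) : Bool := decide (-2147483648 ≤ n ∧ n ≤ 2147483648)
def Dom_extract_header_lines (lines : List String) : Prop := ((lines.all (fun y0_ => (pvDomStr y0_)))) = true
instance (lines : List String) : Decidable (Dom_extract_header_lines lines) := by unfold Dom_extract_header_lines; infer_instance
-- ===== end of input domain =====

-- B replaces A's two early-breaking counting scans with one pass building the header-index table
-- plus pure indexing (objective: simpler); same return value on every input.

-- ===== PORT A =====
-- line.strip().startswith('#')
def pvIsHdr (line : String) : Bool := PySem.Str.startswith (PySem.Str.strip line) "#"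

-- first loop of A: counts headers, breaks at the second, returns header_end (0 = no break)
def pvLoop1 : List (Int × String) → Int → Int
  | [], _ => 0
  | (i, line) :: rest, hc =>
    let hc' := if pvIsHdr line then hc + 1 else hc
    if hc' ≥ 2 then i + 1 else pvLoop1 rest hc'

-- second loop of A: breaks at the first header, returns header_end (0 = no break)
def pvLoop2 : List (Int × String) → Int
  | [] => 0
  | (i, line) :: rest => if pvIsHdr line then i + 1 else pvLoop2 rest

def extract_header_lines (lines : List String) : List String × List String :=
  let he1 := pvLoop1 (PySem.List.enumerate lines 0) 0
  let he := if he1 = 0 then pvLoop2 (PySem.List.enumerate lines 0) else he1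
  (PySem.List.slice lines none (some he), PySem.List.slice lines (some he) none)

-- ===== PORT B =====
def extract_header_lines_alt (lines : List String) : List String × List String :=
  let positions := ((PySem.List.enumerate lines 0).filter (fun p => pvIsHdr p.2)).map (fun p => p.1)
  -- positions[1] + 1 if len(positions) >= 2 else (positions[0] + 1 if positions else 0)
  let he : Int :=
    match positions with
    | _ :: p1 :: _ => p1 + 1
    | [p0] => p0 + 1
    | [] => 0
  (PySem.List.slice lines none (some he), PySem.List.slice lines (some he) none)

-- ===== PRECONDITION & SPEC =====
def Spec_extract_header_lines (lines : List String) (out : List String × List String) : Prop := out = extract_header_lines_alt lines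
instance (lines : List String) (out : List String × List String) : Decidable (Spec_extract_header_lines lines out) := by unfold Spec_extract_header_lines; infer_instance

-- ===== CLAIM (what is proved, stated in full; the proofs are below) =====
def Claim_equal_extract_header_lines : Prop := ∀ (lines : List String), Dom_extract_header_lines lines → Spec_extract_header_lines lines (extract_header_lines lines)

-- ===== LEMMAS AND PROOFS =====

-- header positions of ls when enumeration starts at s
def pvPos (ls : List String) (s : Int) : List Int :=
  ((PySem.List.enumerate ls s).filter (fun p => pvIsHdr p.2)).map (fun p => p.1)

theorem pvPos_nil (s : Int) : pvPos [] s = [] := rfl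

theorem pvPos_cons (l : String) (ls : List String) (s : Int) :
    pvPos (l :: ls) s = if pvIsHdr l then s :: pvPos ls (s + 1) else pvPos ls (s + 1) := by
  simp [pvPos, PySem.List.enumerate_cons, List.filter_cons]
  by_cases h : pvIsHdr l <;> simp [h]

theorem pvLoop2_eq (ls : List String) (s : Int) :
    pvLoop2 (PySem.List.enumerate ls s) =
      (match pvPos ls s with | [] => 0 | p :: _ => p + 1) := by
  induction ls generalizing s with
  | nil => simp [pvPos_nil, PySem.List.enumerate_nil, pvLoop2]
  | cons l ls ih =>
    rw [PySem.List.enumerate_cons, pvPos_cons]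
    by_cases h : pvIsHdr l <;> simp [pvLoop2, h, ih]

theorem pvLoop1_one (ls : List String) (s : Int) :
    pvLoop1 (PySem.List.enumerate ls s) 1 =
      (match pvPos ls s with | [] => 0 | p :: _ => p + 1) := by
  induction ls generalizing s with
  | nil => simp [pvPos_nil, PySem.List.enumerate_nil, pvLoop1]
  | cons l ls ih =>
    rw [PySem.List.enumerate_cons, pvPos_cons]
    by_cases h : pvIsHdr l <;> simp [pvLoop1, h, ih]

theorem pvLoop1_zero (ls : List String) (s : Int) :
    pvLoop1 (PySem.List.enumerate ls s) 0 =
      (match pvPos ls s with | _ :: q :: _ => q + 1 | _ => 0) := by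
  induction ls generalizing s with
  | nil => simp [pvPos_nil, PySem.List.enumerate_nil, pvLoop1]
  | cons l ls ih =>
    rw [PySem.List.enumerate_cons, pvPos_cons]
    by_cases h : pvIsHdr l
    · simp only [pvLoop1, h, if_true]
      norm_num [pvLoop1_one ls (s + 1)]
      cases pvPos ls (s + 1) <;> simp
    · simp [pvLoop1, h, ih]

theorem pvPos_nonneg (ls : List String) (s : Int) (hs : 0 ≤ s) :
    ∀ x ∈ pvPos ls s, 0 ≤ x := by
  induction ls generalizing s with
  | nil => simp [pvPos_nil]
  | cons l ls ih =>
    rw [pvPos_cons]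
    intro x hx
    by_cases h : pvIsHdr l
    · simp [h] at hx
      rcases hx with rfl | hx
      · exact hs
      · exact ih (s + 1) (by omega) x hx
    · simp [h] at hx
      exact ih (s + 1) (by omega) x hx

-- ===== VERDICT (by name: the statement is the Claim_ definition above) =====
theorem extract_header_lines_spec : Claim_equal_extract_header_lines := by
  intro lines _
  unfold Spec_extract_header_lines extract_header_lines extract_header_lines_alt
  rw [pvLoop1_zero lines 0, pvLoop2_eq lines 0]
  have hmap : ((PySem.List.enumerate lines 0).filter (fun p => pvIsHdr p.2)).map
      (fun p => p.1) = pvPos lines 0 := rfl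
  rw [hmap]
  have hpos := pvPos_nonneg lines 0 le_rfl
  rcases hP : pvPos lines 0 with _ | ⟨p, _ | ⟨q, rest⟩⟩
  · simp
  · simp
  · have hq : 0 ≤ q := hpos q (by rw [hP]; simp)
    have : q + 1 ≠ 0 := by omega
    simp [this]
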